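-- pv_equiv track=rewrite | github.com/cjfal2/aLGoRiTHM | 프로그래머스/unrated/138476. 귤 고르기/귤 고르기.py | solution
-- ===== SOURCE A (Python) =====
-- def solution(k, tangerine):
--     answer = 0
--     box = {}
--     for t in tangerine:
--         if t not in box:
--             box[t] = 1
--         else:
--             box[t] += 1
--     for i, j in sorted(box.items(), key=lambda x: x[1], reverse=True):
--         k -= j
--         answer += 1
--         if k <= 0:
--             return answer
--     return answer
-- ===== SOURCE B (Python) =====
-- def solution(k, tangerine):
--     counts = {}
--     for t in tangerine:
--         counts[t] = counts.get(t, 0) + 1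
--     if not counts:
--         return 0
--     m = max(counts.values())
--     fof = [0] * (m + 1)
--     for c in counts.values():
--         fof[c] += 1
--     answer = 0
--     c = m
--     while c >= 1:
--         for _ in range(fof[c]):
--             k -= c
--             answer += 1
--             if k <= 0:
--                 return answer
--         c -= 1
--     return answer
-- ===== Notes on version B (the rewrite author's own statement) =====
-- stated objective: alternative
-- what changed: Replaces the comparison sort of (size,count) items by a counting-sort-style walk: build a frequency-of-frequencies bucket table and greedily consume boxes from the largest count downward in a nested loop.
import Mathlib
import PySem

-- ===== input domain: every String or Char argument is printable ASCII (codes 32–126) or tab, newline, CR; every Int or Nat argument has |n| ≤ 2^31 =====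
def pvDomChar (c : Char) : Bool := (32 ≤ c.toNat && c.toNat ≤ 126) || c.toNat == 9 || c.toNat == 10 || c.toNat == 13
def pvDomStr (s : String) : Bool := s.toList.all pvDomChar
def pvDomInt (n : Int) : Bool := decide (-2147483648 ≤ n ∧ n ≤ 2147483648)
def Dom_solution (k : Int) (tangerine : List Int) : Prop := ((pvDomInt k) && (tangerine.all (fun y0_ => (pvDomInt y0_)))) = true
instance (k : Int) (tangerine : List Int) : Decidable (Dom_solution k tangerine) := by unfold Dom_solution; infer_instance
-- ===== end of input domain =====

-- B replaces A's comparison sort of (size, count) items by a counting-sort-style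
-- descending walk over a frequency-of-frequencies bucket table (alternative algorithm).

-- ===== PORT A =====
-- 'for i, j in sorted(...): k -= j; answer += 1; if k <= 0: return answer' / trailing 'return answer'
def solLoopA : Int → Int → List (Int × Int) → Int
  | _, answer, [] => answer
  | k, answer, (_, j) :: rest =>
    if k - j ≤ 0 then answer + 1 else solLoopA (k - j) (answer + 1) rest

def solution (k : Int) (tangerine : List Int) : Int :=
  let box := tangerine.foldl
    (fun d t => if d.contains t = false then d.insert t 1 else d.modify t 0 (· + 1))
    PySem.Dict.empty
  solLoopA k 0 (PySem.List.sorted box.items (fun x => x.2) true)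

-- ===== PORT B =====
-- inner 'for _ in range(fof[c]): k -= c; answer += 1; if k <= 0: return answer'
-- (Sum.inl = early return with the answer, Sum.inr = fall through with the new state)
def solInner : Int → Nat → Int → Int → Int ⊕ (Int × Int)
  | _, 0, k, answer => Sum.inr (k, answer)
  | c, n + 1, k, answer =>
    if k - c ≤ 0 then Sum.inl (answer + 1) else solInner c n (k - c) (answer + 1)

-- outer 'while c >= 1: …; c -= 1', c counted down from m as a Nat
def solOuter (fof : List Int) : Nat → Int → Int → Int
  | 0, _, answer => answer
  | c + 1, k, answer =>
    match solInner ((c : Int) + 1) (PySem.List.pyGetD fof ((c : Int) + 1) 0).toNat k answer with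
    | Sum.inl ans => ans
    | Sum.inr (k', answer') => solOuter fof c k' answer'

def solution_alt (k : Int) (tangerine : List Int) : Int :=
  let counts := tangerine.foldl (fun d t => d.insert t (d.getD t 0 + 1)) PySem.Dict.empty
  match PySem.List.max? counts.values (fun x => x) with
  | none => 0    -- 'if not counts: return 0'
  | some m =>
    let fof := counts.values.foldl
      (fun f c => PySem.List.pySetD f c (PySem.List.pyGetD f c 0 + 1))
      (List.replicate (m + 1).toNat (0 : Int))
    solOuter fof m.toNat k 0

-- ===== PRECONDITION & SPEC =====
def Spec_solution (k : Int) (tangerine : List Int) (out : Int) : Prop := out = solution_alt k tangerine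
instance (k : Int) (tangerine : List Int) (out : Int) : Decidable (Spec_solution k tangerine out) := by unfold Spec_solution; infer_instance

-- ===== CLAIM (what is proved, stated in full; the proofs are below) =====
def Claim_equal_solution : Prop := ∀ (k : Int) (tangerine : List Int), Dom_solution k tangerine → Spec_solution k tangerine (solution k tangerine)

-- ===== LEMMAS AND PROOFS =====

-- the common greedy loop over a plain list of counts
def pvGreedy : Int → Int → List Int → Int
  | _, answer, [] => answer
  | k, answer, j :: rest =>
    if k - j ≤ 0 then answer + 1 else pvGreedy (k - j) (answer + 1) rest

-- the sequence B's nested loops walk: for c = c₀ down to 1, fof[c] copies of c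
def pvSeq (fof : List Int) : Nat → List Int
  | 0 => []
  | c + 1 =>
    List.replicate (PySem.List.pyGetD fof ((c : Int) + 1) 0).toNat ((c : Int) + 1) ++ pvSeq fof c

theorem solLoopA_eq_greedy (l : List (Int × Int)) : ∀ k a,
    solLoopA k a l = pvGreedy k a (l.map (fun x => x.2)) := by
  induction l with
  | nil => intro k a; rfl
  | cons p rest ih =>
      intro k a
      obtain ⟨i, j⟩ := p
      simp only [solLoopA, List.map, pvGreedy]
      split_ifs with h
      · rfl
      · exact ih _ _

theorem solInner_eq_greedy (c : Int) : ∀ (n : Nat) (k a : Int) (rest : List Int),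
    (match solInner c n k a with
     | Sum.inl ans => ans
     | Sum.inr (k', a') => pvGreedy k' a' rest) =
      pvGreedy k a (List.replicate n c ++ rest) := by
  intro n
  induction n with
  | zero => intro k a rest; rfl
  | succ n ih =>
      intro k a rest
      simp only [solInner, List.replicate, List.cons_append, pvGreedy]
      split_ifs with h
      · rfl
      · exact ih _ _ _

theorem solOuter_eq_greedy (fof : List Int) : ∀ (c : Nat) (k a : Int),
    solOuter fof c k a = pvGreedy k a (pvSeq fof c) := by
  intro c
  induction c with
  | zero => intro k a; rfl
  | succ c ih =>
      intro k a
      simp only [solOuter, pvSeq]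
      rw [← solInner_eq_greedy]
      cases solInner ((c : Int) + 1) (PySem.List.pyGetD fof ((c : Int) + 1) 0).toNat k a with
      | inl ans => rfl
      | inr p => obtain ⟨k', a'⟩ := p; exact ih _ _

-- A's dict-building loop IS collections.Counter
theorem boxA_eq_counter (tangerine : List Int) :
    tangerine.foldl
      (fun d t => if d.contains t = false then d.insert t 1 else d.modify t 0 (· + 1))
      PySem.Dict.empty = PySem.Dict.counter tangerine := by
  rw [PySem.Dict.counter_eq_foldl]
  congr 1
  funext d t
  by_cases h : d.contains t
  · simp [h, PySem.Dict.modify]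
  · simp only [h, if_pos]
    rw [PySem.Dict.modify, PySem.Dict.getD_of_not_contains d 0 (by simpa using h)]
    norm_num

-- the bucket-filling fold: fof[x] ends as (initial) + (count of x among the values)
theorem fof_getD (vs : List Int) : ∀ (f0 : List Int),
    (∀ v ∈ vs, 0 ≤ v ∧ v < (f0.length : Int)) → ∀ (x : Int), 0 ≤ x → x < (f0.length : Int) →
    PySem.List.pyGetD
      (vs.foldl (fun f c => PySem.List.pySetD f c (PySem.List.pyGetD f c 0 + 1)) f0) x 0
      = PySem.List.pyGetD f0 x 0 + (vs.count x : Int) := by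
  induction vs with
  | nil => intro f0 _ x _ _; simp
  | cons v vs ih =>
      intro f0 hmem x hx0 hxL
      obtain ⟨hv0, hvL⟩ := hmem v (by simp)
      have hlen : (PySem.List.pySetD f0 v (PySem.List.pyGetD f0 v 0 + 1)).length = f0.length :=
        PySem.List.length_pySetD _ _ _
      simp only [List.foldl_cons]
      rw [ih _ (by intro w hw; rw [hlen]; exact hmem w (by simp [hw])) x hx0 (by rw [hlen]; exact hxL)]
      rw [PySem.List.pySetD_of_nonneg _ _ hv0]
      rw [PySem.List.pyGetD_eq_getElem _ _ hx0 (by simpa using hxL),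
          PySem.List.pyGetD_eq_getElem _ _ hx0 hxL,
          PySem.List.pyGetD_eq_getElem _ _ hv0 hvL]
      rw [List.getElem_set]
      by_cases hvx : v = x
      · subst hvx
        simp
        omega
      · have hnn : v.toNat ≠ x.toNat := by omega
        simp [hnn, hvx]

-- counts in B's walked sequence
theorem count_pvSeq (fof : List Int) : ∀ (c : Nat) (x : Int),
    (pvSeq fof c).count x =
      if 1 ≤ x ∧ x ≤ (c : Int) then (PySem.List.pyGetD fof x 0).toNat else 0 := by
  intro c
  induction c with
  | zero =>
      intro x; simp only [pvSeq, List.count_nil]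
      split_ifs with h
      · omega
      · rfl
  | succ c ih =>
      intro x
      simp only [pvSeq, List.count_append, ih, List.count_replicate]
      by_cases hx : x = (c : Int) + 1
      · subst hx
        simp only [beq_self_eq_true, if_true]
        rw [if_neg (by omega), if_pos (by constructor <;> omega)]
        omega
      · have hb : (((c : Int) + 1) == x) = false := beq_eq_false_iff_ne.mpr (fun h => hx h.symm)
        simp only [hb, Bool.false_eq_true, if_false]
        by_cases h1 : 1 ≤ x ∧ x ≤ (c : Int)
        · rw [if_pos h1, if_pos (by omega)]
          omega
        · rw [if_neg h1, if_neg (by omega)]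

theorem mem_pvSeq (fof : List Int) (c : Nat) (x : Int) (h : x ∈ pvSeq fof c) :
    1 ≤ x ∧ x ≤ (c : Int) := by
  have := count_pvSeq fof c x
  by_contra hc
  rw [if_neg hc] at this
  have := List.count_pos_iff.mpr h
  omega

theorem pairwise_pvSeq (fof : List Int) : ∀ (c : Nat),
    (pvSeq fof c).Pairwise (fun a b => b ≤ a) := by
  intro c
  induction c with
  | zero => exact List.Pairwise.nil
  | succ c ih =>
      simp only [pvSeq]
      rw [List.pairwise_append]
      refine ⟨List.pairwise_replicate.mpr (Or.inr le_rfl), ih, ?_⟩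
      intro a ha b hb
      have hb' := mem_pvSeq fof c b hb
      have ha' : a = (c : Int) + 1 := (List.eq_of_mem_replicate ha)
      omega

-- ===== VERDICT (by name: the statement is the Claim_ definition above) =====
theorem solution_spec : Claim_equal_solution := by
  intro k tangerine _
  unfold Spec_solution
  rcases eq_or_ne tangerine [] with rfl | hne
  · rfl
  · -- the dicts on both sides are Counter(tangerine)
    simp only [solution, solution_alt]
    rw [boxA_eq_counter, PySem.Dict.foldl_insert_getD_add_one_eq_counter]
    set cnt := PySem.Dict.counter tangerine with hcnt
    -- the values list
    have hvals : cnt.values =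
        (PySem.Set.ofList tangerine).map (fun x => ((tangerine.count x : Int))) := by
      simp [PySem.Dict.values, hcnt, PySem.Dict.items_counter]
    have hvne : cnt.values ≠ [] := by
      rcases tangerine with _ | ⟨t, ts⟩
      · exact absurd rfl hne
      · intro h
        rw [hvals] at h
        have : t ∈ PySem.Set.ofList (t :: ts) := (PySem.Set.mem_ofList _ _).mpr (by simp)
        simp only [List.map_eq_nil_iff] at h
        rw [h] at this; simp at this
    obtain ⟨m, hm⟩ : ∃ m, PySem.List.max? cnt.values (fun x => x) = some m := by
      cases h : PySem.List.max? cnt.values (fun x => x) with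
      | none => exact absurd ((PySem.List.max?_eq_none_iff _ _).mp h) hvne
      | some m => exact ⟨m, rfl⟩
    -- every value is a positive count bounded by m
    have hval_pos : ∀ v ∈ cnt.values, 1 ≤ v := by
      intro v hv
      rw [hvals] at hv
      obtain ⟨x, hx, rfl⟩ := List.mem_map.mp hv
      have : x ∈ tangerine := (PySem.Set.mem_ofList _ _).mp hx
      have := List.count_pos_iff.mpr this
      omega
    have hval_le : ∀ v ∈ cnt.values, v ≤ m := PySem.List.max?_isMax hm
    have hm1 : 1 ≤ m := hval_pos m (PySem.List.max?_mem hm)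
    have hlenrep : ((List.replicate (m + 1).toNat (0 : Int)).length : Int) = m + 1 := by
      simp; omega
    have hdom : ∀ v ∈ cnt.values, 0 ≤ v ∧ v < ((List.replicate (m + 1).toNat (0 : Int)).length : Int) := by
      intro v hv
      rw [hlenrep]
      exact ⟨by linarith [hval_pos v hv], by linarith [hval_le v hv]⟩
    set fof := cnt.values.foldl
      (fun f c => PySem.List.pySetD f c (PySem.List.pyGetD f c 0 + 1))
      (List.replicate (m + 1).toNat (0 : Int)) with hfof
    -- fof[x] = count of x among the values, for 0 ≤ x ≤ m
    have hfof_get : ∀ x : Int, 0 ≤ x → x ≤ m →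
        PySem.List.pyGetD fof x 0 = (cnt.values.count x : Int) := by
      intro x hx0 hxm
      rw [hfof, fof_getD cnt.values _ hdom x hx0 (by rw [hlenrep]; omega)]
      rw [PySem.List.pyGetD_eq_getElem _ _ hx0 (by rw [hlenrep]; omega)]
      simp
    -- B's walked sequence is a permutation of the values …
    have hperm : (pvSeq fof m.toNat).Perm cnt.values := by
      rw [List.perm_iff_count]
      intro x
      rw [count_pvSeq]
      by_cases hx : 1 ≤ x ∧ x ≤ (m.toNat : Int)
      · rw [if_pos hx]
        rw [hfof_get x (by omega) (by omega)]
        simp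
      · rw [if_neg hx]
        by_contra h
        have hmem : x ∈ cnt.values := List.count_pos_iff.mp (by omega)
        have h1 := hval_pos x hmem
        have h2 := hval_le x hmem
        omega
    -- … and so is A's sorted list of counts
    have hpermA : ((PySem.List.sorted cnt.items (fun x => x.2) true).map (fun x => x.2)).Perm
        cnt.values := (PySem.List.sorted_perm cnt.items (fun x => x.2) true).map _
    -- both are sorted descending, hence equal
    have hpwA : ((PySem.List.sorted cnt.items (fun x => x.2) true).map (fun x => x.2)).Pairwise
        (fun a b => b ≤ a) := by
      rw [List.pairwise_map]
      exact PySem.List.sorted_pairwise_rev cnt.items (fun x => x.2)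
    have heq : (PySem.List.sorted cnt.items (fun x => x.2) true).map (fun x => x.2) =
        pvSeq fof m.toNat := by
      refine List.Perm.eq_of_pairwise ?_ hpwA (pairwise_pvSeq fof m.toNat)
        (hpermA.trans hperm.symm)
      intro a b _ _ h1 h2; omega
    simp only [hm]
    rw [solOuter_eq_greedy, solLoopA_eq_greedy, heq]
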